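-- pv_equiv track=rewrite | github.com/QLaHPD/Weather_State_Variables | weather_state_variables/training/pipeline.py | _last_completed_optimizer_batch_count
-- ===== SOURCE A (Python) =====
-- def _last_completed_optimizer_batch_count(
--     total_train_batches: int,
--     processed_batch_count: int,
--     accumulation_steps: int,
-- ) -> int:
--     last_completed = 0
--     for batch_index in range(processed_batch_count):
--         if _should_optimizer_step(total_train_batches, batch_index, accumulation_steps):
--             last_completed = batch_index + 1
--     return last_completed
--
-- def _should_optimizer_step(total_batches: int, batch_index: int, accumulation_steps: int) -> bool:
--     batch_number = batch_index + 1
--     return batch_number % accumulation_steps == 0 or batch_number == total_batches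
-- ===== SOURCE B (Python) =====
-- def _last_completed_optimizer_batch_count(
--     total_train_batches: int,
--     processed_batch_count: int,
--     accumulation_steps: int,
-- ) -> int:
--     p = processed_batch_count
--     if p <= 0:
--         return 0
--     step = abs(accumulation_steps)
--     last = (p // step) * step  # largest multiple of |accumulation_steps| that is <= p (0 if none in 1..p)
--     if 1 <= total_train_batches <= p:
--         last = max(last, total_train_batches)
--     return last
-- ===== Notes on version B (the rewrite author's own statement) =====
-- stated objective: faster
-- what changed: Replaced A's linear scan over all processed batches with an O(1) closed form: the larger of the largest multiple of |accumulation_steps| that is <= processed_batch_count and total_train_batches if it lies in 1..processed_batch_count, else 0.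
import Mathlib
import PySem

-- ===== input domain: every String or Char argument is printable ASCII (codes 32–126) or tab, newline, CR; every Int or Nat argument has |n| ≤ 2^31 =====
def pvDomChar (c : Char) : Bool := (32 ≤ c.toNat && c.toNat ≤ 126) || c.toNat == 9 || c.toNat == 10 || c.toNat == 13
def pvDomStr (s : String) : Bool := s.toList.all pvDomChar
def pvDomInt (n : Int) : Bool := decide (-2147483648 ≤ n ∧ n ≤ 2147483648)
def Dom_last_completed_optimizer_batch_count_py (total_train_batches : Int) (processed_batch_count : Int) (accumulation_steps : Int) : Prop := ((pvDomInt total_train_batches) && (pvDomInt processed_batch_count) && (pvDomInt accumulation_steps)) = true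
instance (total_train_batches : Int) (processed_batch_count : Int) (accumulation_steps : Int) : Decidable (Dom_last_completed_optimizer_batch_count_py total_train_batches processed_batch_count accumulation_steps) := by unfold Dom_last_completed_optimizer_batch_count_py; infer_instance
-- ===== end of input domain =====

-- B replaces A's linear scan over all processed batches by O(1) arithmetic:
-- the last completed optimizer step is the larger of the largest multiple of
-- |accumulation_steps| that is ≤ processed_batch_count and total_train_batches
-- (if the latter lies in 1..processed_batch_count), else 0.

-- ===== PORT A =====
def should_optimizer_step_py (total_batches : Int) (batch_index : Int) (accumulation_steps : Int) : Bool :=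
  let batch_number := batch_index + 1
  PySem.Int.mod batch_number accumulation_steps == 0 || batch_number == total_batches

def last_completed_optimizer_batch_count_py (total_train_batches : Int) (processed_batch_count : Int) (accumulation_steps : Int) : Int :=
  (PySem.List.pyRange 0 processed_batch_count 1).foldl
    (fun last_completed batch_index =>
      if should_optimizer_step_py total_train_batches batch_index accumulation_steps then
        batch_index + 1
      else last_completed)
    0

-- ===== PORT B =====
def last_completed_optimizer_batch_count_py_alt (total_train_batches : Int) (processed_batch_count : Int) (accumulation_steps : Int) : Int :=
  if processed_batch_count ≤ 0 then 0
  else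
    let step := |accumulation_steps|
    let last := PySem.Int.floordiv processed_batch_count step * step
    if 1 ≤ total_train_batches ∧ total_train_batches ≤ processed_batch_count then
      max last total_train_batches
    else last

-- ===== PRECONDITION & SPEC =====
-- Pre_ excludes exactly the inputs where Python A raises ZeroDivisionError:
-- accumulation_steps = 0 with at least one batch to scan (both A and B raise there).
def Pre_last_completed_optimizer_batch_count_py (total_train_batches : Int) (processed_batch_count : Int) (accumulation_steps : Int) : Prop :=
  accumulation_steps ≠ 0 ∨ processed_batch_count ≤ 0

instance (total_train_batches : Int) (processed_batch_count : Int) (accumulation_steps : Int) : Decidable (Pre_last_completed_optimizer_batch_count_py total_train_batches processed_batch_count accumulation_steps) := by unfold Pre_last_completed_optimizer_batch_count_py; infer_instance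

def pvWitness_last_completed_optimizer_batch_count_py : Int × Int × Int := (5, 7, 3)

def Spec_last_completed_optimizer_batch_count_py (total_train_batches : Int) (processed_batch_count : Int) (accumulation_steps : Int) (out : Int) : Prop := out = last_completed_optimizer_batch_count_py_alt total_train_batches processed_batch_count accumulation_steps
instance (total_train_batches : Int) (processed_batch_count : Int) (accumulation_steps : Int) (out : Int) : Decidable (Spec_last_completed_optimizer_batch_count_py total_train_batches processed_batch_count accumulation_steps out) := by unfold Spec_last_completed_optimizer_batch_count_py; infer_instance

-- ===== CLAIM (what is proved, stated in full; the proofs are below) =====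
def Claim_equal_last_completed_optimizer_batch_count_py : Prop := ∀ (total_train_batches : Int) (processed_batch_count : Int) (accumulation_steps : Int), Dom_last_completed_optimizer_batch_count_py total_train_batches processed_batch_count accumulation_steps → Pre_last_completed_optimizer_batch_count_py total_train_batches processed_batch_count accumulation_steps → Spec_last_completed_optimizer_batch_count_py total_train_batches processed_batch_count accumulation_steps (last_completed_optimizer_batch_count_py total_train_batches processed_batch_count accumulation_steps)

-- ===== LEMMAS AND PROOFS =====

lemma witness_ok : Dom_last_completed_optimizer_batch_count_py 5 7 3 ∧ Pre_last_completed_optimizer_batch_count_py 5 7 3 := by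
  constructor <;> decide

-- A's fold agrees with B's closed form for every natural batch count, given a ≠ 0.
lemma fold_eq_closed (t a : Int) (ha : a ≠ 0) (n : Nat) :
    last_completed_optimizer_batch_count_py t (n : Int) a
      = last_completed_optimizer_batch_count_py_alt t (n : Int) a := by
  have hstep : 0 < |a| := abs_pos.mpr ha
  induction n with
  | zero =>
      simp [last_completed_optimizer_batch_count_py, last_completed_optimizer_batch_count_py_alt,
            PySem.List.pyRange_one_eq_nil]
  | succ n ih =>
      have hcast : ((n + 1 : Nat) : Int) = (n : Int) + 1 := by push_cast; ring
      have hsplit : PySem.List.pyRange 0 ((n : Int) + 1) 1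
          = PySem.List.pyRange 0 (n : Int) 1 ++ [(n : Int)] :=
        PySem.List.pyRange_one_succ_right (by positivity)
      have hfold : last_completed_optimizer_batch_count_py t ((n : Int) + 1) a
          = (if should_optimizer_step_py t (n : Int) a then (n : Int) + 1
             else last_completed_optimizer_batch_count_py t (n : Int) a) := by
        simp [last_completed_optimizer_batch_count_py, hsplit, List.foldl_append]
      rw [hcast, hfold]
      set m : Int := (n : Int) + 1 with hm
      by_cases hdvd : |a| ∣ m
      · -- batch_number m is a multiple of accumulation_steps
        have hmod : PySem.Int.mod m a = 0 :=
          (PySem.Int.mod_eq_zero_iff_dvd m a).mpr ((abs_dvd a m).mp hdvd)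
        have hcond : should_optimizer_step_py t (n : Int) a = true := by
          simp [should_optimizer_step_py, ← hm, hmod]
        obtain ⟨k, hk⟩ := hdvd
        have hfd : PySem.Int.floordiv m |a| = k := by
          rw [PySem.Int.floordiv_eq_iff_of_pos hstep]
          constructor
          · nlinarith
          · nlinarith
        have hmul : PySem.Int.floordiv m |a| * |a| = m := by rw [hfd]; linarith [hk]
        simp only [hcond, if_true, last_completed_optimizer_batch_count_py_alt]
        have hmp : ¬ m ≤ 0 := by omega
        simp only [hmp, if_false, hmul]
        by_cases ht : 1 ≤ t ∧ t ≤ m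
        · simp only [ht]; omega
        · simp only [ht, if_false]
      · by_cases hteq : t = m
        · -- batch_number m equals total_train_batches
          have hcond : should_optimizer_step_py t (n : Int) a = true := by
            simp [should_optimizer_step_py, ← hm, hteq]
          have hq := PySem.Int.floordiv_eq_iff_of_pos (a := m) (b := |a|) (q := PySem.Int.floordiv m |a|) hstep
          have hqle : PySem.Int.floordiv m |a| * |a| ≤ m := ((hq.mp rfl)).1
          simp only [hcond, if_true, last_completed_optimizer_batch_count_py_alt]
          have hmp : ¬ m ≤ 0 := by omega
          have ht : 1 ≤ t ∧ t ≤ m := by omega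
          rw [if_neg hmp, if_pos ht]
          omega
        · -- neither: the fold keeps its state and B's closed form is unchanged
          have hmod : PySem.Int.mod m a ≠ 0 := fun h =>
            hdvd ((abs_dvd a m).mpr ((PySem.Int.mod_eq_zero_iff_dvd m a).mp h))
          have hcond : should_optimizer_step_py t (n : Int) a = false := by
            simp [should_optimizer_step_py, ← hm, hmod]
            intro h; exact absurd h.symm hteq
          simp only [hcond, Bool.false_eq_true, if_false]
          rw [ih]
          -- B's value at n equals B's value at m = n+1
          set q : Int := PySem.Int.floordiv m |a| with hqdef
          have hq := (PySem.Int.floordiv_eq_iff_of_pos (a := m) (b := |a|) (q := q) hstep).mp rfl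
          have hne : q * |a| ≠ m := fun h => hdvd ⟨q, by linarith [h]⟩
          have hqn : PySem.Int.floordiv (n : Int) |a| = q := by
            rw [PySem.Int.floordiv_eq_iff_of_pos hstep]
            omega
          simp only [last_completed_optimizer_batch_count_py_alt, hqn, ← hqdef]
          by_cases hn0 : (n : Int) ≤ 0
          · -- n = 0 : both sides are 0
            have ha2 : 2 ≤ |a| := by
              have h1 : |a| ≠ 1 := fun h => hdvd (h ▸ one_dvd m)
              omega
            have hq0 : q = 0 := by
              rw [hqdef, PySem.Int.floordiv_eq_iff_of_pos hstep]
              refine ⟨by simpa using (by omega : (0:Int) ≤ m), by simpa using (by omega : m < |a|)⟩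
            have hmp : ¬ m ≤ 0 := by omega
            have htm : ¬ (1 ≤ t ∧ t ≤ m) := by omega
            rw [if_pos hn0, if_neg hmp, if_neg htm, hq0]
            ring
          · have hmp : ¬ m ≤ 0 := by omega
            rw [if_neg hn0, if_neg hmp]
            have htiff : (1 ≤ t ∧ t ≤ m) ↔ (1 ≤ t ∧ t ≤ (n : Int)) := by omega
            by_cases ht : 1 ≤ t ∧ t ≤ (n : Int)
            · rw [if_pos (htiff.mpr ht), if_pos ht]
            · rw [if_neg (fun h => ht (htiff.mp h)), if_neg ht]

-- ===== VERDICT (by name: the statement is the Claim_ definition above) =====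
theorem last_completed_optimizer_batch_count_py_spec : Claim_equal_last_completed_optimizer_batch_count_py := by
  intro t p a _ hpre
  unfold Spec_last_completed_optimizer_batch_count_py
  by_cases hp : p ≤ 0
  · simp [last_completed_optimizer_batch_count_py, last_completed_optimizer_batch_count_py_alt,
          PySem.List.pyRange_one_eq_nil hp, hp]
  · have ha : a ≠ 0 := by
      rcases hpre with h | h
      · exact h
      · omega
    have hp' : p = ((p.toNat : Nat) : Int) := by omega
    rw [hp']
    exact fold_eq_closed t a ha p.toNat
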